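-- pv_equiv track=rewrite | github.com/anacardells/Codility | Pi_code_challenge/Solution.py | insert_letter
-- ===== SOURCE A (Python) =====
-- def insert_letter(string, letter):
--     """
--     Inserts a letter in an ordered string using binary search
--     """
--     low = 0
--     high = len(string) - 1
--     while low <= high:
--         mid = (low + high) // 2
--         if letter < string[mid]:
--             high = mid - 1
--         elif letter > string[mid]:
--             low = mid + 1
--         else:
--             return string[:mid] + letter + string[mid:]
--     return string[:low] + letter + string[low:]
-- ===== SOURCE B (Python) =====
-- def insert_letter(string, letter):
--     """
--     Inserts a letter in an ordered string by divide and conquer on substrings: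
--     compare with the middle character, recurse on one half, and rebuild the
--     result by concatenation (no low/high index state).
--     """
--     if not string:
--         return letter
--     mid = (len(string) - 1) // 2
--     if letter < string[mid]:
--         return insert_letter(string[:mid], letter) + string[mid:]
--     if letter > string[mid]:
--         return string[:mid + 1] + insert_letter(string[mid + 1:], letter)
--     return string[:mid] + letter + string[mid:]
-- ===== Notes on version B (the rewrite author's own statement) =====
-- stated objective: alternative
-- what changed: The index-based while loop over low/high bounds is replaced by an index-free divide-and-conquer recursion on substrings: compare with the middle character, recurse on string[:mid] or string[mid+1:], and rebuild the result by concatenation; A's exact comparison sequence must be kept because A's value on a string that is not sorted depends on the probe path, but B maintains no index state at all.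
import Mathlib
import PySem

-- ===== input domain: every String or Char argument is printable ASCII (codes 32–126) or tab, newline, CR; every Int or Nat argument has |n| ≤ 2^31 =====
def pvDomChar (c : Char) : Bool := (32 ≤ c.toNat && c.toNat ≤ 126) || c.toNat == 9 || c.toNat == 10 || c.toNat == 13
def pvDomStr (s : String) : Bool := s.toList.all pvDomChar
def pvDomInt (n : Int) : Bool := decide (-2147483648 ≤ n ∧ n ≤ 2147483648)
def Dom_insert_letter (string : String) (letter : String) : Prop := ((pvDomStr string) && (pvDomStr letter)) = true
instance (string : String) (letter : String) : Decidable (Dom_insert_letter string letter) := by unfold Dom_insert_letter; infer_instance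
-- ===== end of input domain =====

-- B restructures A's index-based binary-search loop as an index-free divide-and-conquer
-- recursion on substrings (compare with the middle character, recurse on one half, rebuild
-- by concatenation); A's comparison sequence is kept, since A's value on a string that is
-- not sorted depends on the exact probe path, but B carries no low/high index state.


-- ===== PORT A =====
-- A's while-loop: low/high bounds, midpoint, three-way comparison (Python's string
-- comparison on the 1-char slice is '<' on List Char per PYSEM), slicing at each exit.
def pvBsearch (cs : List Char) (lt : List Char) (low high : Int) : List Char :=
  if h : low ≤ high then
    let mid := PySem.Int.floordiv (low + high) 2
    match PySem.List.pyGet? cs mid with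
    | none => []   -- Python IndexError; unreachable from insert_letter's initial bounds
    | some c =>
      if lt < [c] then pvBsearch cs lt low (mid - 1)
      else if [c] < lt then pvBsearch cs lt (mid + 1) high
      else PySem.List.slice cs none (some mid) ++ lt ++ PySem.List.slice cs (some mid) none
  else PySem.List.slice cs none (some low) ++ lt ++ PySem.List.slice cs (some low) none
termination_by (high + 1 - low).toNat
decreasing_by
  · have := PySem.Int.floordiv_two_mid_bounds h
    omega
  · have := PySem.Int.floordiv_two_mid_bounds h
    omega

def insert_letter (string : String) (letter : String) : String :=
  String.ofList (pvBsearch string.toList letter.toList 0 ((string.toList.length : Int) - 1))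

-- ===== PORT B =====
-- Source B's recursion: empty string -> letter; mid = (len-1)//2 (a Nat division, exact since
-- len ≥ 1 here); compare with string[mid]; recurse on string[:mid] or string[mid+1:].
def pvDnc (cs : List Char) (lt : List Char) : List Char :=
  if h : cs.length = 0 then lt
  else
    let mid : Nat := (cs.length - 1) / 2
    match PySem.List.pyGet? cs (mid : Int) with
    | none => []   -- Python IndexError; unreachable: mid < len
    | some c =>
      if lt < [c] then
        pvDnc (PySem.List.slice cs none (some (mid : Int))) lt ++
          PySem.List.slice cs (some (mid : Int)) none
      else if [c] < lt then
        PySem.List.slice cs none (some ((mid + 1 : Nat) : Int)) ++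
          pvDnc (PySem.List.slice cs (some ((mid + 1 : Nat) : Int)) none) lt
      else
        PySem.List.slice cs none (some (mid : Int)) ++ lt ++
          PySem.List.slice cs (some (mid : Int)) none
termination_by cs.length
decreasing_by
  · simp only [PySem.List.slice_to_natCast, List.length_take]
    omega
  · simp only [PySem.List.slice_from_natCast, List.length_drop]
    omega

def insert_letter_alt (string : String) (letter : String) : String :=
  String.ofList (pvDnc string.toList letter.toList)

-- ===== PRECONDITION & SPEC =====
def Spec_insert_letter (string : String) (letter : String) (out : String) : Prop := out = insert_letter_alt string letter
instance (string : String) (letter : String) (out : String) : Decidable (Spec_insert_letter string letter out) := by unfold Spec_insert_letter; infer_instance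

-- ===== CLAIM (what is proved, stated in full; the proofs are below) =====
def Claim_equal_insert_letter : Prop := ∀ (string : String) (letter : String), Dom_insert_letter string letter → Spec_insert_letter string letter (insert_letter string letter)

-- ===== LEMMAS AND PROOFS =====

-- the key correspondence: A's search over bounds [lo, lo+n-1] of cs is B's recursion on
-- the segment (cs.drop lo).take n, wrapped in the untouched prefix and suffix
theorem pvBsearch_eq_pvDnc (cs lt : List Char) :
    ∀ (n : Nat), ∀ (lo : Nat), lo + n ≤ cs.length →
    pvBsearch cs lt (lo : Int) ((lo : Int) + (n : Int) - 1) =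
      cs.take lo ++ pvDnc ((cs.drop lo).take n) lt ++ cs.drop (lo + n) := by
  intro n
  induction n using Nat.strong_induction_on with
  | _ n ih =>
  intro lo hlen
  by_cases hn : n = 0
  · subst hn
    rw [pvBsearch, dif_neg (by push_cast; omega), pvDnc, dif_pos (by simp)]
    simp [PySem.List.slice_to_natCast, PySem.List.slice_from_natCast]
  · have h01 : 1 ≤ n := by omega
    rw [pvBsearch, dif_pos (by omega)]
    set m : Nat := (n - 1) / 2 with hm
    have hmn : m < n := by omega
    have hm1n : m + 1 ≤ n := by omega
    have hidx : lo + m < cs.length := by omega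
    have hmid : PySem.Int.floordiv ((lo : Int) + ((lo : Int) + (n : Int) - 1)) 2 =
        ((lo + m : Nat) : Int) := by
      rw [PySem.Int.floordiv_eq_ediv_of_pos (by omega)]
      push_cast
      omega
    have hgetA : PySem.List.pyGet? cs ((lo + m : Nat) : Int) = some (cs[lo + m]'hidx) := by
      rw [PySem.List.pyGet?_natCast, List.getElem?_eq_getElem hidx]
    -- the segment B recurses on
    have hseglen : ((cs.drop lo).take n).length = n := by simp; omega
    have hsegidx : m < ((cs.drop lo).take n).length := by omega
    have hsegget : ((cs.drop lo).take n)[m]'hsegidx = cs[lo + m]'hidx := by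
      rw [List.getElem_take, List.getElem_drop]
    have hsegm : (((cs.drop lo).take n).length - 1) / 2 = m := by rw [hseglen]
    have hgetB : PySem.List.pyGet? ((cs.drop lo).take n)
        (((((cs.drop lo).take n).length - 1) / 2 : Nat) : Int) = some (cs[lo + m]'hidx) := by
      rw [hsegm, PySem.List.pyGet?_natCast, List.getElem?_eq_getElem hsegidx, hsegget]
    -- splitting the suffix at the midpoint
    have hdropsplit : cs.drop (lo + m) = (cs.drop (lo + m)).take (n - m) ++ cs.drop (lo + n) := by
      conv_lhs => rw [← List.take_append_drop (n - m) (cs.drop (lo + m))]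
      rw [List.drop_drop]
      congr 2
      omega
    simp only [hmid, hgetA]
    conv_rhs => rw [pvDnc]
    rw [dif_neg (by omega)]
    simp only [hgetB]
    by_cases h1 : lt < [cs[lo + m]'hidx]
    · rw [if_pos h1, if_pos h1]
      rw [show ((lo + m : Nat) : Int) - 1 = (lo : Int) + (m : Int) - 1 by push_cast; ring]
      rw [ih m hmn lo (by omega)]
      rw [hsegm, PySem.List.slice_to_natCast, PySem.List.slice_from_natCast]
      rw [List.take_take, List.drop_take, List.drop_drop,
        min_eq_left (le_of_lt hmn)]
      conv_lhs => rw [hdropsplit]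
      simp [List.append_assoc]
    · rw [if_neg h1, if_neg h1]
      by_cases h2 : [cs[lo + m]'hidx] < lt
      · rw [if_pos h2, if_pos h2]
        rw [show ((lo + m : Nat) : Int) + 1 = ((lo + m + 1 : Nat) : Int) by push_cast; ring]
        rw [show (lo : Int) + (n : Int) - 1 =
          ((lo + m + 1 : Nat) : Int) + ((n - m - 1 : Nat) : Int) - 1 by push_cast; omega]
        rw [ih (n - m - 1) (by omega) (lo + m + 1) (by omega)]
        rw [show lo + m + 1 + (n - m - 1) = lo + n by omega]
        rw [hsegm, PySem.List.slice_to_natCast, PySem.List.slice_from_natCast]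
        rw [List.take_take, List.drop_take, List.drop_drop, min_eq_left hm1n]
        rw [show n - (m + 1) = n - m - 1 by omega, show lo + (m + 1) = lo + m + 1 by omega]
        conv_lhs => rw [show lo + m + 1 = lo + (m + 1) by omega, List.take_add]
        rw [show lo + (m + 1) = lo + m + 1 by omega]
        simp [List.append_assoc]
      · rw [if_neg h2, if_neg h2]
        rw [hsegm, PySem.List.slice_to_natCast, PySem.List.slice_from_natCast,
          PySem.List.slice_to_natCast, PySem.List.slice_from_natCast]
        rw [List.take_take, List.drop_take, List.drop_drop,
          min_eq_left (le_of_lt hmn)]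
        conv_lhs => rw [List.take_add, hdropsplit]
        simp [List.append_assoc]

theorem insert_letter_spec : Claim_equal_insert_letter := by
  intro s letter _
  unfold Spec_insert_letter insert_letter insert_letter_alt
  congr 1
  have h := pvBsearch_eq_pvDnc s.toList letter.toList s.toList.length 0 (by omega)
  simp only [Nat.cast_zero, zero_add, List.take_zero, List.drop_zero,
    List.nil_append, List.take_length, List.drop_length, List.append_nil] at h
  exact h
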